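-- pv_equiv track=rewrite | github.com/bouldermaettel/text-snippet-answer-generator | backend/scripts/translate_existing.py | group_snippets_by_base
-- ===== SOURCE A (Python) =====
-- from collections import defaultdict
--
-- def group_snippets_by_base(snippets: list[dict]) -> dict[str, list[dict]]:
--     """Group snippets by base title (without language suffix).
--
--     For example, 'company-user-einladen-de' and 'company-user-einladen-en'
--     would be grouped together under 'company-user-einladen'.
--     """
--     by_base = defaultdict(list)
--     for s in snippets:
--         title = s.get("title", "") or ""
--         base = title
--         for suffix in ["-de", "-en", "-fr", "-it"]:
--             if title.endswith(suffix):
--                 base = title[:-3]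
--                 break
--         by_base[base].append(s)
--     return dict(by_base)
-- ===== SOURCE B (Python) =====
-- _SUFFIXES = ("-de", "-en", "-fr", "-it")
--
-- def _base_of(s):
--     title = s.get("title", "") or ""
--     return title[:-3] if title.endswith(_SUFFIXES) else title
--
-- def group_snippets_by_base(snippets):
--     """Group snippets by base title (without language suffix)."""
--     bases = [_base_of(s) for s in snippets]
--     return {b: [s for s, bb in zip(snippets, bases) if bb == b]
--             for b in dict.fromkeys(bases)}
-- ===== Notes on version B (the rewrite author's own statement) =====
-- stated objective: idiomatic
-- what changed: Replaces the single-pass defaultdict accumulation with a key-first strategy: compute each snippet's base once, dedup the bases in first-occurrence order (dict.fromkeys), and build each group by filtering, with the suffix loop collapsed into one tuple-argument str.endswith test.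
import Mathlib
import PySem

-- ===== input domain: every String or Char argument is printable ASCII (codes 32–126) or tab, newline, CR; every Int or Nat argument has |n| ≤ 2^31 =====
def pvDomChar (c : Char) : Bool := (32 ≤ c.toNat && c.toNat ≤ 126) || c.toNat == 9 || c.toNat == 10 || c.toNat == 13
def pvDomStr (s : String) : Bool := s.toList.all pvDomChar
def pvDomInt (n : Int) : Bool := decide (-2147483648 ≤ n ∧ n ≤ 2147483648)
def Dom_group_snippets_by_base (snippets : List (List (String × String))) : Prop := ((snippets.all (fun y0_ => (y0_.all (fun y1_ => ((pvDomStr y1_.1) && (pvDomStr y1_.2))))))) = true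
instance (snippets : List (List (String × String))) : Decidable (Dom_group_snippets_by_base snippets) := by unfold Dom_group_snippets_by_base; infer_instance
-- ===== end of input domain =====

-- B computes each snippet's base once, dedups the bases in first-occurrence order and builds each
-- group by filtering, instead of A's single-pass defaultdict accumulation (objective: idiomatic).


-- ===== PORT A =====
-- 'for suffix in [...]: if title.endswith(suffix): base = title[:-3]; break' with 'base = title' before it
def pvBaseLoopA (title : String) : List String → String
  | [] => title
  | suffix :: rest =>
    if PySem.Str.endswith title suffix then PySem.Str.slice title none (some (-3))
    else pvBaseLoopA title rest

def group_snippets_by_base (snippets : List (List (String × String))) : List (String × List (List (String × String))) :=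
  (snippets.foldl (fun by_base s =>
      let title0 := (PySem.Dict.mk s).getD "title" ""               -- s.get("title", "")
      let title := if title0 == "" then "" else title0               -- … or ""
      let base := pvBaseLoopA title ["-de", "-en", "-fr", "-it"]
      by_base.modify base [] (· ++ [s]))                             -- by_base[base].append(s) (defaultdict)
    PySem.Dict.empty).items                                          -- dict(by_base)

-- ===== PORT B =====
def pvBaseOf (s : List (String × String)) : String :=
  let title0 := (PySem.Dict.mk s).getD "title" ""
  let title := if title0 == "" then "" else title0
  if PySem.Str.endswith title "-de" || PySem.Str.endswith title "-en" ||
     PySem.Str.endswith title "-fr" || PySem.Str.endswith title "-it" then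
    PySem.Str.slice title none (some (-3))
  else title

def group_snippets_by_base_alt (snippets : List (List (String × String))) : List (String × List (List (String × String))) :=
  let bases := snippets.map pvBaseOf
  (PySem.List.dedup bases).map (fun b =>
    (b, ((snippets.zip bases).filter (fun p => p.2 == b)).map (·.1)))

-- ===== PRECONDITION & SPEC =====
def Spec_group_snippets_by_base (snippets : List (List (String × String))) (out : List (String × List (List (String × String)))) : Prop := out = group_snippets_by_base_alt snippets
instance (snippets : List (List (String × String))) (out : List (String × List (List (String × String)))) : Decidable (Spec_group_snippets_by_base snippets out) := by unfold Spec_group_snippets_by_base; infer_instance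

-- ===== CLAIM (what is proved, stated in full; the proofs are below) =====
def Claim_equal_group_snippets_by_base : Prop := ∀ (snippets : List (List (String × String))), Dom_group_snippets_by_base snippets → Spec_group_snippets_by_base snippets (group_snippets_by_base snippets)

-- ===== LEMMAS AND PROOFS =====

-- A's first-match suffix loop agrees with B's single tuple-endswith test (all suffixes cut 3 chars).
theorem pvBase_agree (s : List (String × String)) :
    (let title0 := (PySem.Dict.mk s).getD "title" ""
     let title := if title0 == "" then "" else title0
     pvBaseLoopA title ["-de", "-en", "-fr", "-it"]) = pvBaseOf s := by
  simp only [pvBaseOf, pvBaseLoopA]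
  split_ifs <;> simp_all

-- zip-with-its-mapped-keys filter-then-project is a plain filter on the composed predicate
theorem pvZipFilter {α β : Type} (xs : List α) (f : α → β) (g : β → Bool) :
    ((xs.zip (xs.map f)).filter (fun p => g p.2)).map (·.1)
      = xs.filter (fun x => g (f x)) := by
  induction xs with
  | nil => rfl
  | cons x t ih =>
    simp only [List.map_cons, List.zip_cons_cons, List.filter_cons]
    by_cases h : g (f x) <;> simp [h, ih]

-- ===== VERDICT (by name: the statement is the Claim_ definition above) =====
theorem group_snippets_by_base_spec : Claim_equal_group_snippets_by_base := by
  intro snippets _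
  unfold Spec_group_snippets_by_base group_snippets_by_base
  -- rewrite A's fold as a fold over (key, snippet) pairs keyed by pvBaseOf
  have hfold :
      (snippets.foldl (fun by_base s =>
          let title0 := (PySem.Dict.mk s).getD "title" ""
          let title := if title0 == "" then "" else title0
          let base := pvBaseLoopA title ["-de", "-en", "-fr", "-it"]
          by_base.modify base [] (· ++ [s])) PySem.Dict.empty)
        = ((snippets.map (fun s => (pvBaseOf s, s))).foldl
            (fun d p => d.modify p.1 [] (· ++ [p.2])) PySem.Dict.empty) := by
    have hstep : (fun (by_base : PySem.Dict String (List (List (String × String)))) s =>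
        let title0 := (PySem.Dict.mk s).getD "title" ""
        let title := if title0 == "" then "" else title0
        let base := pvBaseLoopA title ["-de", "-en", "-fr", "-it"]
        by_base.modify base [] (· ++ [s]))
        = (fun d s => d.modify (pvBaseOf s) [] (· ++ [s])) := by
      funext d s
      simpa using congrArg (fun b => d.modify b [] (· ++ [s])) (pvBase_agree s)
    rw [hstep, List.foldl_map]
  rw [hfold]
  set d := ((snippets.map (fun s => (pvBaseOf s, s))).foldl
      (fun d p => d.modify p.1 [] (· ++ [p.2])) PySem.Dict.empty) with hd
  -- keys of the final dict: first-occurrence dedup of the bases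
  have hkeys : d.keys = PySem.List.dedup (snippets.map pvBaseOf) := by
    rw [hd]
    have := PySem.Dict.keys_foldl_modify_key
      (l := snippets) (key := pvBaseOf) (d0 := ([] : List (List (String × String))))
      (f := fun _ s v => v ++ [s]) (d := PySem.Dict.empty)
    simp only [List.foldl_map] at this ⊢
    rw [this]
    simp [PySem.Dict.keys_empty, PySem.List.dedup_eq_ofList, PySem.Set.update,
      PySem.Set.ofList_eq_foldl]
  have hnodup : d.keys.Nodup := by
    rw [hkeys, PySem.List.dedup_eq_ofList]; exact PySem.Set.nodup_ofList _
  -- value at each key: the filter of snippets with that base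
  have hval : ∀ b, d.getD b [] = snippets.filter (fun s => pvBaseOf s == b) := by
    intro b
    rw [hd, PySem.Dict.getD_foldl_modify_append]
    simp [PySem.Dict.getD_empty, List.filter_map, Function.comp_def, List.map_map]
  -- items of a nodup-key dict are keys paired with their getD values
  have hitems : d.items = d.keys.map (fun k => (k, d.getD k [])) := by
    have h1 : d.items = d.items.map (fun p => (p.1, d.getD p.1 [])) := by
      conv_lhs => rw [show d.items = d.items.map id from (List.map_id d.items).symm]
      refine List.map_congr_left (fun p hp => ?_)
      have := PySem.Dict.getD_of_mem_items d (k := p.1) (v := p.2)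
        (by simpa using hp) hnodup ([] : List (List (String × String)))
      simp [this]
    have h2 : d.keys = d.items.map (·.1) := by simp [PySem.Dict.keys]
    rw [h2, List.map_map]
    exact h1
  rw [hitems, hkeys]
  unfold group_snippets_by_base_alt
  refine List.map_congr_left (fun b _ => ?_)
  rw [hval b, pvZipFilter snippets pvBaseOf (fun y => y == b)]
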